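-- pv_equiv track=rewrite | github.com/labasubagia/algo | number_swap.py | swap_naive
-- ===== SOURCE A (Python) =====
-- def swap_naive(arr1: list[int], arr2: list[int]) -> tuple[int, int] | None:
--     s1 = sum(arr1)
--     s2 = sum(arr2)
--     for i in range(len(arr1)):
--         for j in range(len(arr2)):
--             if s1 - arr1[i] + arr2[j] == s2 - arr2[j] + arr1[i]:
--                 return i, j
--
--     return None
-- ===== SOURCE B (Python) =====
-- def swap_naive(arr1: list[int], arr2: list[int]) -> tuple[int, int] | None:
--     s1 = sum(arr1)
--     s2 = sum(arr2)
--     d = s2 - s1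
--     if d % 2 != 0:
--         return None
--     half = d // 2
--     first = {}
--     for j, v in enumerate(arr2):
--         if v not in first:
--             first[v] = j
--     for i, x in enumerate(arr1):
--         j = first.get(x + half)
--         if j is not None:
--             return i, j
--     return None
-- ===== Notes on version B (the rewrite author's own statement) =====
-- stated objective: faster
-- what changed: Replaces the nested scan of all (i,j) pairs by a parity check plus a value->first-index dictionary over arr2, so arr1 is scanned once with O(1) lookups for the target value arr1[i] + (s2-s1)/2.
import Mathlib
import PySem

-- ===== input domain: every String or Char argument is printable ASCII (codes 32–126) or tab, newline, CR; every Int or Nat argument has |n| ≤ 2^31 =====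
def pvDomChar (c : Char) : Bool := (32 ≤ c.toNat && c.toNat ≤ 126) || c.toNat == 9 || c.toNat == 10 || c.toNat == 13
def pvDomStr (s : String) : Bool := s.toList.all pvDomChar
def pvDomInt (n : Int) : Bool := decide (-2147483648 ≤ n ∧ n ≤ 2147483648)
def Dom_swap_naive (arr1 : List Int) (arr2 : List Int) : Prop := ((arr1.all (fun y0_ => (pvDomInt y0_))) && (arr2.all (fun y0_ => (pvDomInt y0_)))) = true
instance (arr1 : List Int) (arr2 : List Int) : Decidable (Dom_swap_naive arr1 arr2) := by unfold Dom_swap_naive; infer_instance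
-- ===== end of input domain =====

-- B replaces A's nested pairwise scan by a parity check plus a value→first-index
-- dictionary over arr2, scanning arr1 once (objective: faster, asymptotic).

-- ===== PORT A =====
-- inner 'for j in range(len(arr2))' loop with early return of j
def swapInnerA (s1 s2 x : Int) : List Int → Nat → Option Nat
  | [], _ => none
  | y :: ys, j => if s1 - x + y = s2 - y + x then some j else swapInnerA s1 s2 x ys (j + 1)

-- outer 'for i in range(len(arr1))' loop with early return of (i, j)
def swapOuterA (s1 s2 : Int) (arr2 : List Int) : List Int → Nat → Option (Int × Int)
  | [], _ => none
  | x :: xs, i =>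
    match swapInnerA s1 s2 x arr2 0 with
    | some j => some ((i : Int), (j : Int))
    | none => swapOuterA s1 s2 arr2 xs (i + 1)

def swap_naive (arr1 : List Int) (arr2 : List Int) : Option (Int × Int) :=
  let s1 := arr1.sum
  let s2 := arr2.sum
  swapOuterA s1 s2 arr2 arr1 0

-- ===== PORT B =====
-- 'for j, v in enumerate(arr2): if v not in first: first[v] = j'
def buildFirstB (arr2 : List Int) : PySem.Dict Int Int :=
  (PySem.List.enumerate arr2).foldl
    (fun d p => if d.contains p.2 then d else d.insert p.2 p.1) PySem.Dict.empty

-- 'for i, x in enumerate(arr1): j = first.get(x + half); if j is not None: return i, j'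
def scanB (first : PySem.Dict Int Int) (half : Int) : List (Int × Int) → Option (Int × Int)
  | [] => none
  | p :: rest =>
    match first.get? (p.2 + half) with
    | some j => some (p.1, j)
    | none => scanB first half rest

def swap_naive_alt (arr1 : List Int) (arr2 : List Int) : Option (Int × Int) :=
  let s1 := arr1.sum
  let s2 := arr2.sum
  let d := s2 - s1
  if PySem.Int.mod d 2 ≠ 0 then none
  else
    let half := PySem.Int.floordiv d 2
    scanB (buildFirstB arr2) half (PySem.List.enumerate arr1)

-- ===== PRECONDITION & SPEC =====
def Spec_swap_naive (arr1 : List Int) (arr2 : List Int) (out : Option (Int × Int)) : Prop := out = swap_naive_alt arr1 arr2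
instance (arr1 : List Int) (arr2 : List Int) (out : Option (Int × Int)) : Decidable (Spec_swap_naive arr1 arr2 out) := by unfold Spec_swap_naive; infer_instance

-- ===== CLAIM (what is proved, stated in full; the proofs are below) =====
def Claim_equal_swap_naive : Prop := ∀ (arr1 : List Int) (arr2 : List Int), Dom_swap_naive arr1 arr2 → Spec_swap_naive arr1 arr2 (swap_naive arr1 arr2)

-- ===== LEMMAS AND PROOFS =====

-- reference: first index (starting at s, as Int) of value v in a list
def firstIdx (v : Int) : List Int → Int → Option Int
  | [], _ => none
  | y :: ys, s => if y = v then some s else firstIdx v ys (s + 1)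

-- A's inner loop finds nothing when s2 - s1 is odd
theorem innerA_none_of_odd {s1 s2 : Int} (h : (s2 - s1) % 2 ≠ 0) (x : Int) :
    ∀ (ys : List Int) (j : Nat), swapInnerA s1 s2 x ys j = none := by
  intro ys
  induction ys with
  | nil => intro j; rfl
  | cons y ys ih =>
    intro j
    have hne : ¬ (s1 - x + y = s2 - y + x) := by omega
    simp [swapInnerA, hne, ih]

-- A's inner loop is the first index of x + half when 2 * half = s2 - s1
theorem innerA_eq_firstIdx {s1 s2 half : Int} (h : 2 * half = s2 - s1) (x : Int) :
    ∀ (ys : List Int) (j : Nat),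
      (swapInnerA s1 s2 x ys j).map (fun j => (j : Int)) = firstIdx (x + half) ys (j : Int) := by
  intro ys
  induction ys with
  | nil => intro j; rfl
  | cons y ys ih =>
    intro j
    have hiff : (s1 - x + y = s2 - y + x) ↔ (y = x + half) := by omega
    by_cases hc : y = x + half
    · have ht : s1 - x + (x + half) = s2 - (x + half) + x := by omega
      simp [swapInnerA, firstIdx, hc, ht]
    · have : ¬ (s1 - x + y = s2 - y + x) := fun hh => hc (hiff.mp hh)
      simpa [swapInnerA, firstIdx, this, hc] using ih (j + 1)

-- B's dictionary lookup is the first index of v in arr2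
theorem get?_buildFirst_aux (v : Int) :
    ∀ (ys : List Int) (s : Nat) (d : PySem.Dict Int Int),
      ((PySem.List.enumerate ys (s : Int)).foldl
        (fun d p => if d.contains p.2 then d else d.insert p.2 p.1) d).get? v =
      match d.get? v with
      | some w => some w
      | none => firstIdx v ys (s : Int) := by
  intro ys
  induction ys with
  | nil =>
    intro s d
    cases h : d.get? v <;> simp [PySem.List.enumerate_nil, firstIdx, h]
  | cons y ys ih =>
    intro s d
    rw [PySem.List.enumerate_cons]
    simp only [List.foldl_cons]
    have hsucc : ((s : Int) + 1) = ((s + 1 : Nat) : Int) := by push_cast; ring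
    by_cases hcont : d.contains y
    · rw [if_pos hcont, hsucc, ih (s + 1) d]
      cases h : d.get? v with
      | some w => rfl
      | none =>
        have hne : y ≠ v := by
          intro he; subst he
          rw [PySem.Dict.contains_eq_isSome_get?, h] at hcont; simp at hcont
        simp [firstIdx, hne, ← hsucc]
    · rw [if_neg hcont, hsucc, ih (s + 1) (d.insert y (s : Int)), PySem.Dict.get?_insert]
      by_cases hyv : v = y
      · subst hyv
        have hd : d.get? v = none := by
          cases h : d.get? v with
          | none => rfl
          | some w => rw [PySem.Dict.contains_eq_isSome_get?, h] at hcont; simp at hcont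
        simp [hd, firstIdx]
      · rw [if_neg hyv]
        cases h : d.get? v with
        | some w => rfl
        | none =>
          have hyv' : y ≠ v := fun he => hyv he.symm
          simp [firstIdx, hyv', ← hsucc]

theorem get?_buildFirst (arr2 : List Int) (v : Int) :
    (buildFirstB arr2).get? v = firstIdx v arr2 0 := by
  have := get?_buildFirst_aux v arr2 0 PySem.Dict.empty
  simpa [buildFirstB, PySem.Dict.get?_empty] using this

-- the two outer loops agree (even case)
theorem outer_eq {s1 s2 half : Int} (h : 2 * half = s2 - s1) (arr2 : List Int) :
    ∀ (xs : List Int) (i : Nat),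
      swapOuterA s1 s2 arr2 xs i =
        scanB (buildFirstB arr2) half (PySem.List.enumerate xs (i : Int)) := by
  intro xs
  induction xs with
  | nil => intro i; rfl
  | cons x xs ih =>
    intro i
    rw [PySem.List.enumerate_cons]
    have hin := innerA_eq_firstIdx h x arr2 0
    simp only [swapOuterA, scanB]
    rw [get?_buildFirst arr2 (x + half)]
    cases hA : swapInnerA s1 s2 x arr2 0 with
    | some j =>
      have : firstIdx (x + half) arr2 ((0 : Nat) : Int) = some (j : Int) := by
        rw [← hin]; simp [hA]
      simp only [Nat.cast_zero] at this
      rw [this]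
    | none =>
      have : firstIdx (x + half) arr2 ((0 : Nat) : Int) = none := by
        rw [← hin]; simp [hA]
      simp only [Nat.cast_zero] at this
      rw [this]
      have hsucc : ((i : Int) + 1) = ((i + 1 : Nat) : Int) := by push_cast; ring
      rw [hsucc, ← ih (i + 1)]

-- the outer loop returns none when s2 - s1 is odd
theorem outerA_none_of_odd {s1 s2 : Int} (h : (s2 - s1) % 2 ≠ 0) (arr2 : List Int) :
    ∀ (xs : List Int) (i : Nat), swapOuterA s1 s2 arr2 xs i = none := by
  intro xs
  induction xs with
  | nil => intro i; rfl
  | cons x xs ih =>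
    intro i
    simp [swapOuterA, innerA_none_of_odd h x arr2 0, ih]

-- ===== VERDICT (by name: the statement is the Claim_ definition above) =====
theorem swap_naive_spec : Claim_equal_swap_naive := by
  intro arr1 arr2 _
  unfold Spec_swap_naive swap_naive swap_naive_alt
  set s1 := arr1.sum
  set s2 := arr2.sum
  have hmod : PySem.Int.mod (s2 - s1) 2 = (s2 - s1) % 2 :=
    PySem.Int.mod_eq_emod_of_pos (by norm_num)
  by_cases hodd : (s2 - s1) % 2 = 0
  · have heven : 2 * PySem.Int.floordiv (s2 - s1) 2 = s2 - s1 := by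
      rw [PySem.Int.floordiv_eq_ediv_of_pos (by norm_num)]
      omega
    simp only [hmod, hodd, ne_eq, not_true_eq_false, if_false]
    simpa using outer_eq heven arr2 arr1 0
  · simp only [hmod, hodd, ne_eq, not_false_eq_true, if_true]
    exact outerA_none_of_odd hodd arr2 arr1 0
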